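-- pv_equiv track=rewrite | github.com/duykienvp/sigspatial-2019-geo-marketplace | searchable-encryption/searchableencryption/hve/hierarchicalencoding.py | encode_cell_id
-- ===== SOURCE A (Python) =====
-- def encode_cell_id(d: int, x: int, y: int) -> list:
--     """ Get hierarchical encoding binary representation of cell (x, y) with the grid of d x d.
--     See Section 3.2 in `https://dl.acm.org/citation.cfm?id=2557559`
--
--     :param int d: dimension of the grid
--     :param int x: x index
--     :param int y: y index
--
--     :returns: a list of binary representation
--     """
--     rep = []
--     mid = int(d / 2)
--
--     if x < mid:
--         rep.append(0)
--     else: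
--         rep.append(1)
--         x -= mid
--
--     if y < mid:
--         rep.append(0)
--     else:
--         rep.append(1)
--         y -= mid
--
--     if 1 < mid:
--         rep.extend(encode_cell_id(mid, x, y))
--
--     return rep
-- ===== SOURCE B (Python) =====
-- def _bits(mids, v):
--     """One-dimensional pass: emit one bit per threshold, subtracting on a 1-bit."""
--     out = []
--     for m in mids:
--         if v < m:
--             out.append(0)
--         else:
--             out.append(1)
--             v -= m
--     return out
--
--
-- def encode_cell_id(d: int, x: int, y: int) -> list:
--     """Hierarchical encoding of cell (x, y): precompute the halving thresholds,
--     encode x and y independently, then interleave the two bit strings."""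
--     mids = []
--     m = int(d / 2)
--     while True:
--         mids.append(m)
--         if not 1 < m:
--             break
--         m = int(m / 2)
--     rep = []
--     for bx, by in zip(_bits(mids, x), _bits(mids, y)):
--         rep.append(bx)
--         rep.append(by)
--     return rep
-- ===== Notes on version B (the rewrite author's own statement) =====
-- stated objective: alternative
-- what changed: Replaces the self-calling recursion that interleaves per level with a three-phase decomposition: precompute the list of halving thresholds once, encode x and y independently in two one-dimensional passes, then interleave the two bit strings via zip.
import Mathlib
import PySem

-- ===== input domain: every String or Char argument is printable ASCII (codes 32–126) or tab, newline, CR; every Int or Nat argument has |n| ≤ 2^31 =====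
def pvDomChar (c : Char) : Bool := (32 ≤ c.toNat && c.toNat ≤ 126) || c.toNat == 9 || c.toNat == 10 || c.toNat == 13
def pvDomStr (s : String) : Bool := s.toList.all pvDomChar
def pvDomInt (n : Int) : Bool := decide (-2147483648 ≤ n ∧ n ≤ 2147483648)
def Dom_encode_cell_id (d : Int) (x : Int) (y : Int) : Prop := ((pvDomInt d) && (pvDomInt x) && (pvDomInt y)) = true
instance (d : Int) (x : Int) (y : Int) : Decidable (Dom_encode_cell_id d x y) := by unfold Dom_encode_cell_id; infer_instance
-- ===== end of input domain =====

-- B recomputes the same bit string by precomputing the halving thresholds once and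
-- interleaving two independent one-dimensional encodings (objective: alternative decomposition).
-- Note: Python's `int(d / 2)` is float division then truncation; on |d| ≤ 2^31 the float
-- quotient is exact, so it equals Int.tdiv (truncation toward zero).

-- termination helpers for the two ports (cited by name in decreasing_by)
theorem pv_tdiv2_lt (m : Int) (h : 1 < m.tdiv 2) : (m.tdiv 2).toNat < m.toNat := by
  have h2 : (0:Int) ≤ m := by
    by_contra hc
    have h3 : ((-m).tdiv 2) ≥ 0 := Int.tdiv_nonneg (by omega) (by norm_num)
    have h4 : (-m).tdiv 2 = -(m.tdiv 2) := Int.neg_tdiv m 2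
    omega
  have := Int.tdiv_eq_ediv_of_nonneg h2 (b := 2)
  omega

theorem pv_tdiv2_lt' (m : Int) (h : 1 < m) : (m.tdiv 2).toNat < m.toNat := by
  have := Int.tdiv_eq_ediv_of_nonneg (a := m) (by omega) (b := 2)
  omega

-- ===== PORT A =====
-- literal transliteration of A's recursion: emit the x-bit, the y-bit, then recurse on mid
def encode_cell_id (d : Int) (x : Int) (y : Int) : List Int :=
  let mid := d.tdiv 2
  let bx := if x < mid then ((0 : Int), x) else (1, x - mid)
  let by' := if y < mid then ((0 : Int), y) else (1, y - mid)
  bx.1 :: by'.1 :: (if 1 < mid then encode_cell_id mid bx.2 by'.2 else [])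
termination_by d.toNat
decreasing_by exact pv_tdiv2_lt d (by assumption)

-- ===== PORT B =====
-- the `while` loop of Source B collecting the successive thresholds (first iteration appends m,
-- then continues while 1 < m with m := m.tdiv 2)
def pvMids (m : Int) : List Int :=
  m :: (if 1 < m then pvMids (m.tdiv 2) else [])
termination_by m.toNat
decreasing_by exact pv_tdiv2_lt' m (by assumption)

-- Source B's `_bits`: one bit per threshold, subtracting the threshold on a 1-bit
def pvBits (mids : List Int) (v : Int) : List Int :=
  match mids with
  | [] => []
  | m :: ms => if v < m then 0 :: pvBits ms v else 1 :: pvBits ms (v - m)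

-- Source B's final loop over zip(xbits, ybits), appending bx then by (zip truncates)
def pvInter : List Int → List Int → List Int
  | a :: as, b :: bs => a :: b :: pvInter as bs
  | _, _ => []

def encode_cell_id_alt (d : Int) (x : Int) (y : Int) : List Int :=
  let mids := pvMids (d.tdiv 2)
  pvInter (pvBits mids x) (pvBits mids y)

-- ===== PRECONDITION & SPEC =====
def Spec_encode_cell_id (d : Int) (x : Int) (y : Int) (out : List Int) : Prop := out = encode_cell_id_alt d x y
instance (d : Int) (x : Int) (y : Int) (out : List Int) : Decidable (Spec_encode_cell_id d x y out) := by unfold Spec_encode_cell_id; infer_instance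

-- ===== CLAIM (what is proved, stated in full; the proofs are below) =====
def Claim_equal_encode_cell_id : Prop := ∀ (d : Int) (x : Int) (y : Int), Dom_encode_cell_id d x y → Spec_encode_cell_id d x y (encode_cell_id d x y)

-- ===== LEMMAS AND PROOFS =====

theorem encode_eq_alt (n : Nat) (d x y : Int) (hd : d.toNat ≤ n) :
    encode_cell_id d x y = pvInter (pvBits (pvMids (d.tdiv 2)) x) (pvBits (pvMids (d.tdiv 2)) y) := by
  induction n generalizing d x y with
  | zero =>
    have hm : ¬ 1 < d.tdiv 2 := fun h => by have := pv_tdiv2_lt d h; omega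
    rw [encode_cell_id, pvMids]
    simp only [hm, if_false, pvBits, pvInter]
    split_ifs <;> simp [pvInter]
  | succ n ihn =>
    rw [encode_cell_id, pvMids]
    by_cases hm : 1 < d.tdiv 2
    · have hrec : ∀ x y : Int, encode_cell_id (d.tdiv 2) x y =
          pvInter (pvBits (pvMids ((d.tdiv 2).tdiv 2)) x) (pvBits (pvMids ((d.tdiv 2).tdiv 2)) y) :=
        fun x y => ihn (d.tdiv 2) x y (by have := pv_tdiv2_lt d hm; omega)
      simp only [hm, if_true, pvBits]
      split_ifs <;> simp [pvInter, hrec]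
    · simp only [hm, if_false, pvBits, pvInter]
      split_ifs <;> simp [pvInter]

-- ===== VERDICT (by name: the statement is the Claim_ definition above) =====
theorem encode_cell_id_spec : Claim_equal_encode_cell_id := by
  intro d x y _
  unfold Spec_encode_cell_id encode_cell_id_alt
  exact encode_eq_alt d.toNat d x y le_rfl
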